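-- pv_equiv track=rewrite | github.com/khsung/BackjoonPython | Backjoon_Python/Programmers/Recommend A Profession.py | solution
-- ===== SOURCE A (Python) =====
-- def solution(table, languages, preference):
--     answer = ''
--     max_score=0
--     temp_answer=[]
--     for i in range(len(table)):
--         table[i]=list(table[i].split())
--         temp=0
--         for j in range(len(languages)):
--             try:
--                 temp+=((6-table[i].index(languages[j]))*preference[j])
--             except:
--                 pass
--         if temp>max_score:
--             max_score=temp
--             temp_answer=[table[i][0]]
--         elif temp==max_score:
--             temp_answer.append(table[i][0])
--     temp_answer.sort()
--     answer=temp_answer[0]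
--     return answer
-- ===== SOURCE B (Python) =====
-- def solution(table, languages, preference):
--     # Invert the join: aggregate preferences into one dict keyed by language,
--     # then score each row by walking its OWN words once (first occurrences only),
--     # and pick the winner as a single min() over (-score, words) tuples.
--     pref = {}
--     for lang, p in zip(languages, preference):
--         pref[lang] = pref.get(lang, 0) + p
--     for i in range(len(table)):
--         table[i] = table[i].split()
--
--     def score(words):
--         s = 0
--         seen = set()
--         for k, w in enumerate(words):
--             if w not in seen:
--                 seen.add(w)
--                 s += (6 - k) * pref.get(w, 0)
--         return s
--
--     return min((-score(w), w) for w in table)[1][0]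
-- ===== Notes on version B (the rewrite author's own statement) =====
-- stated objective: faster
-- what changed: B inverts the join: instead of scanning each row once per language with list.index, it aggregates preferences into a language-keyed dict and scores each row by a single walk over the row's own words (first occurrences only), and it replaces A's running-max state machine plus sort()/[0] tie-break by one min() over (-score, words) tuples.
import Mathlib
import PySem

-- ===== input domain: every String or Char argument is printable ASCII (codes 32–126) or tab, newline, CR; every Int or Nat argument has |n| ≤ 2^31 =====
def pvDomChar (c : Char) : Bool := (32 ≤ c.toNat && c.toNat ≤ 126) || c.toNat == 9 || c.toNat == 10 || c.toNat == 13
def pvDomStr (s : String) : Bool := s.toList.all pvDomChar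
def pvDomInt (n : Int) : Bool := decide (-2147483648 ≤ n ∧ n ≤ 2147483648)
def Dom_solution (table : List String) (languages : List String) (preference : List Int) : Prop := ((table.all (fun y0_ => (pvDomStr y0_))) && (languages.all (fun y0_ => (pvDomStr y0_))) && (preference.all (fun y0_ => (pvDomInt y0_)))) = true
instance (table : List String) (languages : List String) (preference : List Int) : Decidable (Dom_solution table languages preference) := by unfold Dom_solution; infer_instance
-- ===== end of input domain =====

-- B inverts the join: preferences are aggregated once into a language-keyed dict and each
-- row is scored by a single walk over its own words (first occurrences), with the winner
-- picked by one min over (-score, words) tuples instead of A's running max + sort()[0]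
-- (objective: faster; measured). Both Pythons mutate table[i] in place to the split word list;
-- the equivalence proved here is about the return value (B performs the same mutation).

-- ===== PORT A =====
-- inner 'for j in range(len(languages))' with try/except: the iteration is skipped
-- when .index (ValueError) or preference[j] (IndexError) raises
def pvAInner (words : List String) (languages : List String) (preference : List Int) : Int :=
  (PySem.List.enumerate languages 0).foldl (fun temp jl =>
    match PySem.List.index? words jl.2, PySem.List.pyGet? preference jl.1 with
    | some k, some p => temp + (6 - (k : Int)) * p
    | _, _ => temp) 0

-- the main 'for i in range(len(table))' loop with state (max_score, temp_answer);
-- table[i] is written and then only read inside iteration i, so the mutated table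
-- need not be carried
def pvALoop (languages : List String) (preference : List Int) :
    List String → Int → List String → Int × List String
  | [], maxScore, tempAnswer => (maxScore, tempAnswer)
  | row :: rest, maxScore, tempAnswer =>
    let words := PySem.Str.split₀ row
    let temp := pvAInner words languages preference
    if maxScore < temp then pvALoop languages preference rest temp [words.headD ""]
    else if temp = maxScore then
      pvALoop languages preference rest maxScore (tempAnswer ++ [words.headD ""])
    else pvALoop languages preference rest maxScore tempAnswer

def solution (table : List String) (languages : List String) (preference : List Int) : String :=
  let res := pvALoop languages preference table 0 []
  (PySem.List.sorted res.2 (fun x => x) false).headD ""  -- temp_answer.sort(); temp_answer[0] (raises outside Pre_)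

-- ===== PORT B =====
-- pref = {}; for lang, p in zip(languages, preference): pref[lang] = pref.get(lang, 0) + p
def pvPref (languages : List String) (preference : List Int) : PySem.Dict String Int :=
  (languages.zip preference).foldl (fun d lp => d.insert lp.1 (d.getD lp.1 0 + lp.2)) PySem.Dict.empty

-- body of 'for k, w in enumerate(words)' in score(): state (s, seen)
def pvStep (pref : PySem.Dict String Int) (st : Int × PySem.Set String) (kw : Int × String) :
    Int × PySem.Set String :=
  if st.2.contains kw.2 then st
  else (st.1 + (6 - kw.1) * pref.getD kw.2 0, PySem.Set.add st.2 kw.2)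

-- def score(words): s = 0; seen = set(); for k, w in enumerate(words): …; return s
def pvBScore (pref : PySem.Dict String Int) (words : List String) : Int :=
  ((PySem.List.enumerate words 0).foldl (pvStep pref) (0, PySem.Set.empty)).1

-- Python's '<' on lists of strings (lexicographic, shorter prefix first)
def pvListLt : List String → List String → Bool
  | _, [] => false
  | [], _ :: _ => true
  | x :: xs, y :: ys => if x < y then true else if x == y then pvListLt xs ys else false

-- Python's '<' on (-score, words) tuples
def pvPairLt (a b : Int × List String) : Bool :=
  a.1 < b.1 || (a.1 == b.1 && pvListLt a.2 b.2)

def solution_alt (table : List String) (languages : List String) (preference : List Int) : String :=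
  let pref := pvPref languages preference
  let rows := table.map PySem.Str.split₀          -- table[i] = table[i].split()
  match rows.map (fun w => (-(pvBScore pref w), w)) with
  | [] => ""                                       -- min() of nothing raises (outside Pre_)
  | p :: rest =>                                   -- min((-score(w), w) for w in table)[1][0]
    ((rest.foldl (fun best x => if pvPairLt x best then x else best) p).2).headD ""

-- ===== PRECONDITION & SPEC =====
-- a row's score, as a direct formula over the input (used only by Pre_/Raises_)
def pvRowScore (row : String) (languages : List String) (preference : List Int) : Int :=
  ((languages.zip preference).map (fun lp =>
    match PySem.List.index? (PySem.Str.split₀ row) lp.1 with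
    | some k => (6 - (k : Int)) * lp.2
    | none => 0)).sum

-- Pre_ excludes exactly the inputs where Python A raises IndexError: either no row
-- scores ≥ 0 (so temp_answer is empty at the final temp_answer[0]), or a row that
-- splits to [] is reached while max_score is still 0 (its [0] is read on append).
def Pre_solution (table : List String) (languages : List String) (preference : List Int) : Prop :=
  (∃ r ∈ table, 0 ≤ pvRowScore r languages preference) ∧
  ∀ i ∈ List.range table.length, PySem.Str.split₀ (table.getD i "") = [] →
    ∃ k ∈ List.range i, 0 < pvRowScore (table.getD k "") languages preference
instance (table : List String) (languages : List String) (preference : List Int) : Decidable (Pre_solution table languages preference) := by unfold Pre_solution; infer_instance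

def pvWitness_solution : List String × List String × List Int := (["b sql", "a sql"], ["sql"], [3])

def Spec_solution (table : List String) (languages : List String) (preference : List Int) (out : String) : Prop := out = solution_alt table languages preference
instance (table : List String) (languages : List String) (preference : List Int) (out : String) : Decidable (Spec_solution table languages preference out) := by unfold Spec_solution; infer_instance

-- ===== CLAIM (what is proved, stated in full; the proofs are below) =====
def Claim_equal_solution : Prop := ∀ (table : List String) (languages : List String) (preference : List Int), Dom_solution table languages preference → Pre_solution table languages preference → Spec_solution table languages preference (solution table languages preference)


-- ===== LEMMAS AND PROOFS =====

-- the first word of a row, as A and B both read it (headD "" is only reached outside Pre_)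
def pvName (r : String) : String := (PySem.Str.split₀ r).headD ""

-- A's inner loop, generalised over the enumerate start, equals the score formula
theorem pvAInner_gen (words : List String) (preference : List Int) :
    ∀ (langs : List String) (s : Nat) (init : Int),
      (PySem.List.enumerate langs (s : Int)).foldl (fun temp jl =>
        match PySem.List.index? words jl.2, PySem.List.pyGet? preference jl.1 with
        | some k, some p => temp + (6 - (k : Int)) * p
        | _, _ => temp) init
      = init + ((langs.zip (preference.drop s)).map (fun lp =>
          match PySem.List.index? words lp.1 with
          | some k => (6 - (k : Int)) * lp.2
          | none => 0)).sum := by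
  intro langs
  induction langs with
  | nil => intro s init; simp [PySem.List.enumerate_nil]
  | cons l ls ih =>
    intro s init
    rw [PySem.List.enumerate_cons, List.foldl_cons,
        show ((s : Int) + 1) = ((s + 1 : Nat) : Int) by push_cast; ring, ih (s + 1),
        show preference.drop (s + 1) = (preference.drop s).tail from (List.tail_drop ..).symm]
    have hget : PySem.List.pyGet? preference (s : Int) = (preference.drop s).head? := by
      simp [PySem.List.pyGet?_natCast, List.head?_drop]
    cases hd : preference.drop s with
    | nil =>
      rw [hget, hd]
      cases hidx : PySem.List.index? words l <;> simp
    | cons p rest =>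
      rw [hget, hd]
      cases hidx : PySem.List.index? words l <;>
        rw [PySem.List.index?_eq_idxOf?] at hidx <;> simp [hidx] <;> ring

theorem pvAInner_eq (r : String) (languages : List String) (preference : List Int) :
    pvAInner (PySem.Str.split₀ r) languages preference = pvRowScore r languages preference := by
  unfold pvAInner pvRowScore
  simpa using pvAInner_gen (PySem.Str.split₀ r) preference languages 0 0

-- A's main loop, characterised: final max of the scores and the names of the rows attaining it
theorem pvALoop_spec (languages : List String) (preference : List Int) :
    ∀ (rows : List String) (m : Int) (acc : List String),
      pvALoop languages preference rows m acc =
        (rows.foldl (fun a r => max a (pvRowScore r languages preference)) m,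
         (if rows.foldl (fun a r => max a (pvRowScore r languages preference)) m = m then acc else [])
           ++ (rows.filter (fun r => pvRowScore r languages preference
                 == rows.foldl (fun a r => max a (pvRowScore r languages preference)) m)).map pvName) := by
  intro rows
  induction rows with
  | nil => intro m acc; simp [pvALoop]
  | cons row rest ih =>
    intro m acc
    have hub := PySem.List.le_foldl_max_int rest (fun r => pvRowScore r languages preference)
    rw [show pvALoop languages preference (row :: rest) m acc =
          (if m < pvRowScore row languages preference then
            pvALoop languages preference rest (pvRowScore row languages preference) [pvName row]
          else if pvRowScore row languages preference = m then
            pvALoop languages preference rest m (acc ++ [pvName row])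
          else pvALoop languages preference rest m acc) by
      rw [pvALoop]; rw [pvAInner_eq]; rfl]
    rcases lt_trichotomy m (pvRowScore row languages preference) with hlt | heq | hgt
    · rw [if_pos hlt, ih]
      have hM := (hub (pvRowScore row languages preference)).1
      rw [List.foldl_cons, show max m (pvRowScore row languages preference) = pvRowScore row languages preference by omega]
      have hne : rest.foldl (fun a r => max a (pvRowScore r languages preference)) (pvRowScore row languages preference) ≠ m := by omega
      rw [if_neg hne]
      by_cases hcase : rest.foldl (fun a r => max a (pvRowScore r languages preference)) (pvRowScore row languages preference) = pvRowScore row languages preference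
      · rw [if_pos hcase]
        simp [List.filter_cons, hcase, List.map_cons]
      · rw [if_neg hcase]
        simp only [List.filter_cons, beq_iff_eq,
          if_neg (fun h : pvRowScore row languages preference = _ => hcase h.symm)]
    · rw [if_neg (by omega), if_pos heq.symm, ih]
      rw [List.foldl_cons, show max m (pvRowScore row languages preference) = m by omega]
      by_cases hM : rest.foldl (fun a r => max a (pvRowScore r languages preference)) m = m
      · rw [if_pos hM, if_pos hM]
        have : pvRowScore row languages preference
            = rest.foldl (fun a r => max a (pvRowScore r languages preference)) m := by omega
        simp [List.filter_cons, ← this, ← heq]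
      · rw [if_neg hM, if_neg hM]
        have : ¬ (pvRowScore row languages preference
            == rest.foldl (fun a r => max a (pvRowScore r languages preference)) m) = true := by
          have := (hub m).1
          simp; omega
        simp [List.filter_cons, this]
    · rw [if_neg (by omega), if_neg (by omega), ih]
      rw [List.foldl_cons, show max m (pvRowScore row languages preference) = m by omega]
      have : ¬ (pvRowScore row languages preference
          == rest.foldl (fun a r => max a (pvRowScore r languages preference)) m) = true := by
        have := (hub m).1
        simp; omega
      simp [List.filter_cons, this]

-- B's score loop: the accumulator shifts out, the seen-set is independent of it
theorem pvScore_shift (d : PySem.Dict String Int) :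
    ∀ (words : List String) (k : Int) (seen : PySem.Set String) (a : Int),
      (PySem.List.enumerate words k).foldl (pvStep d) (a, seen)
      = (a + ((PySem.List.enumerate words k).foldl (pvStep d) (0, seen)).1,
         ((PySem.List.enumerate words k).foldl (pvStep d) (0, seen)).2) := by
  intro words
  induction words with
  | nil => intro k seen a; simp [PySem.List.enumerate_nil]
  | cons x t ih =>
    intro k seen a
    rw [PySem.List.enumerate_cons, List.foldl_cons, List.foldl_cons]
    by_cases h : seen.contains x
    · simp only [pvStep, h, if_pos]
      exact ih (k + 1) seen a
    · simp only [pvStep, h, Bool.false_eq_true, if_neg, not_false_iff]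
      rw [ih (k + 1) (PySem.Set.add seen x) (a + (6 - k) * d.getD x 0),
          ih (k + 1) (PySem.Set.add seen x) (0 + (6 - k) * d.getD x 0)]
      simp only [Prod.mk.injEq]
      exact ⟨by ring, trivial⟩

-- one dict update pref[w] += p changes a row's score by (6 - first index of w) * p
theorem pvScore_insert (d : PySem.Dict String Int) (w : String) (p : Int) :
    ∀ (words : List String) (k : Int) (seen : PySem.Set String),
      (PySem.List.enumerate words k).foldl (pvStep (d.insert w (d.getD w 0 + p))) (0, seen)
      = (((PySem.List.enumerate words k).foldl (pvStep d) (0, seen)).1 +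
          (if seen.contains w then 0 else
            match PySem.List.index? words w with
            | some j => (6 - (k + (j : Int))) * p
            | none => 0),
         ((PySem.List.enumerate words k).foldl (pvStep d) (0, seen)).2) := by
  intro words
  induction words with
  | nil =>
    intro k seen
    simp [PySem.List.enumerate_nil, PySem.List.index?]
  | cons x t ih =>
    intro k seen
    rw [PySem.List.enumerate_cons, List.foldl_cons, List.foldl_cons]
    by_cases hx : seen.contains x
    · simp only [pvStep, hx, if_pos]
      rw [ih (k + 1) seen]
      by_cases hw : seen.contains w
      · simp [hw, (PySem.Set.contains_iff seen w).mp hw]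
      · have hxw : x ≠ w := by
          intro h; rw [h] at hx; exact hw hx
        rw [PySem.List.index?_cons_of_ne t hxw]
        simp only [hw, Bool.false_eq_true, if_neg, not_false_iff]
        cases hidx : PySem.List.index? t w with
        | none => simp
        | some j =>
          simp only [Option.map_some, Prod.mk.injEq]
          refine ⟨by push_cast; ring, trivial⟩
    · -- x not seen: both take the add branch
      simp only [pvStep, hx, Bool.false_eq_true, if_neg, not_false_iff]
      by_cases hxw : x = w
      · subst hxw
        rw [PySem.Dict.getD_insert]
        simp only [if_pos rfl]
        rw [pvScore_shift, pvScore_shift (seen := PySem.Set.add seen x) (a := 0 + (6 - k) * d.getD x 0),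
            ih (k + 1) (PySem.Set.add seen x)]
        have hseen : (PySem.Set.add seen x).contains x = true := by
          rw [PySem.Set.contains_iff]
          rw [PySem.Set.mem_add]
          right; rfl
        rw [PySem.List.index?_cons_self]
        simp only [hseen, if_pos, hx, Bool.false_eq_true, if_neg, not_false_iff,
          Prod.mk.injEq]
        refine ⟨by push_cast; ring, trivial⟩
      · rw [PySem.Dict.getD_insert]
        rw [if_neg hxw]
        rw [pvScore_shift, pvScore_shift (seen := PySem.Set.add seen x) (a := 0 + (6 - k) * d.getD x 0),
            ih (k + 1) (PySem.Set.add seen x)]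
        have hseen : (PySem.Set.add seen x).contains w = seen.contains w := by
          rcases h : seen.contains w
          · rw [Bool.eq_false_iff]
            intro hc
            rw [PySem.Set.contains_iff, PySem.Set.mem_add] at hc
            rcases hc with hc | hc
            · exact absurd ((PySem.Set.contains_iff seen w).mpr hc) (by rw [h]; simp)
            · exact hxw hc.symm
          · rw [PySem.Set.contains_iff, PySem.Set.mem_add]
            left; exact (PySem.Set.contains_iff seen w).mp h
        rw [hseen, PySem.List.index?_cons_of_ne t hxw]
        by_cases hw : seen.contains w
        · simp [hw, (PySem.Set.contains_iff seen w).mp hw]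
        · simp only [hw, Bool.false_eq_true, if_neg, not_false_iff]
          cases hidx : PySem.List.index? t w with
          | none => simp
          | some j =>
            simp only [Option.map_some, Prod.mk.injEq]
            refine ⟨by push_cast; ring, trivial⟩

theorem pvScore_empty_dict :
    ∀ (words : List String) (k : Int) (seen : PySem.Set String),
      ((PySem.List.enumerate words k).foldl (pvStep PySem.Dict.empty) (0, seen)).1 = 0 := by
  intro words
  induction words with
  | nil => intro k seen; simp [PySem.List.enumerate_nil]
  | cons x t ih =>
    intro k seen
    rw [PySem.List.enumerate_cons, List.foldl_cons]
    by_cases h : seen.contains x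
    · simp only [pvStep, h, if_pos]
      exact ih (k + 1) seen
    · simp only [pvStep, h, Bool.false_eq_true, if_neg, not_false_iff]
      have hd : (PySem.Dict.empty : PySem.Dict String Int).getD x 0 = 0 := by
        simp [PySem.Dict.getD]
      rw [hd]
      simpa using ih (k + 1) (PySem.Set.add seen x)

-- folding the zip into the dict adds A's per-language terms to the score
theorem pvScore_foldPref (words : List String) :
    ∀ (zl : List (String × Int)) (d : PySem.Dict String Int),
      pvBScore (zl.foldl (fun d lp => d.insert lp.1 (d.getD lp.1 0 + lp.2)) d) words
      = pvBScore d words + (zl.map (fun lp =>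
          match PySem.List.index? words lp.1 with
          | some j => (6 - (j : Int)) * lp.2
          | none => 0)).sum := by
  intro zl
  induction zl with
  | nil => intro d; simp
  | cons lp t ih =>
    intro d
    rw [List.foldl_cons, ih, List.map_cons, List.sum_cons]
    have hins : pvBScore (d.insert lp.1 (d.getD lp.1 0 + lp.2)) words
        = pvBScore d words +
          (match PySem.List.index? words lp.1 with
           | some j => (6 - (j : Int)) * lp.2
           | none => 0) := by
      unfold pvBScore
      rw [pvScore_insert d lp.1 lp.2 words 0 PySem.Set.empty]
      have hce : (PySem.Set.empty : PySem.Set String).contains lp.1 = false := rfl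
      rw [hce]
      simp only [Bool.false_eq_true, if_neg, not_false_iff]
      cases hidx : PySem.List.index? words lp.1 <;> simp
    rw [hins]
    ring

-- B's score of a row equals the score formula
theorem pvBScore_eq (r : String) (languages : List String) (preference : List Int) :
    pvBScore (pvPref languages preference) (PySem.Str.split₀ r)
      = pvRowScore r languages preference := by
  unfold pvPref pvRowScore
  rw [pvScore_foldPref]
  have h0 : pvBScore PySem.Dict.empty (PySem.Str.split₀ r) = 0 :=
    pvScore_empty_dict (PySem.Str.split₀ r) 0 PySem.Set.empty
  rw [h0, zero_add]

-- order facts for Python's tuple/list comparison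
theorem pvListLt_irrefl : ∀ a : List String, pvListLt a a = false := by
  intro a
  induction a with
  | nil => rfl
  | cons x xs ih => simp [pvListLt, ih]

theorem pvListLt_antisymm : ∀ a b : List String,
    pvListLt a b = false → pvListLt b a = false → a = b := by
  intro a
  induction a with
  | nil =>
    intro b h1 h2
    cases b with
    | nil => rfl
    | cons y ys => simp [pvListLt] at h1
  | cons x xs ih =>
    intro b h1 h2
    cases b with
    | nil => simp [pvListLt] at h2
    | cons y ys =>
      simp only [pvListLt] at h1 h2
      by_cases hxy : x < y
      · simp [hxy] at h1
      · by_cases hyx : y < x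
        · simp [hyx] at h2
        · have hxy' : x = y := le_antisymm (not_lt.mp hyx) (not_lt.mp hxy)
          subst hxy'
          simp only [hxy, if_false, beq_self_eq_true, if_true] at h1 h2
          rw [ih ys h1 h2]
  termination_by a => a.length

theorem pvListLt_trans : ∀ a b c : List String,
    pvListLt a b = true → pvListLt b c = true → pvListLt a c = true := by
  intro a
  induction a with
  | nil =>
    intro b c h1 h2
    cases c with
    | nil =>
      cases b with
      | nil => exact h1
      | cons y ys => simp [pvListLt] at h2
    | cons z zs => simp [pvListLt]
  | cons x xs ih =>
    intro b c h1 h2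
    cases b with
    | nil => simp [pvListLt] at h1
    | cons y ys =>
      cases c with
      | nil => simp [pvListLt] at h2
      | cons z zs =>
        simp only [pvListLt] at h1 h2 ⊢
        by_cases hxy : x < y
        · by_cases hyz : y < z
          · simp [lt_trans hxy hyz]
          · by_cases hyz' : (y == z)
            · have := eq_of_beq hyz'; subst this; simp [hxy]
            · simp [hyz, hyz'] at h2
        · by_cases hxy' : (x == y)
          · have := eq_of_beq hxy'; subst this
            simp only [hxy, if_false, beq_self_eq_true, if_true] at h1
            by_cases hyz : x < z
            · simp [hyz]
            · by_cases hyz' : (x == z)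
              · have := eq_of_beq hyz'; subst this
                simp only [hyz, if_false, beq_self_eq_true, if_true] at h2 ⊢
                exact ih ys zs h1 h2
              · simp [hyz, hyz'] at h2
          · simp [hxy, hxy'] at h1

theorem pvPairLt_irrefl (a : Int × List String) : pvPairLt a a = false := by
  simp [pvPairLt, pvListLt_irrefl]

theorem pvPairLt_trans {a b c : Int × List String}
    (h1 : pvPairLt a b = true) (h2 : pvPairLt b c = true) : pvPairLt a c = true := by
  simp only [pvPairLt, Bool.or_eq_true, Bool.and_eq_true, decide_eq_true_eq, beq_iff_eq] at h1 h2 ⊢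
  rcases h1 with h1 | ⟨h1e, h1l⟩ <;> rcases h2 with h2 | ⟨h2e, h2l⟩
  · left; omega
  · left; omega
  · left; omega
  · right; exact ⟨by omega, pvListLt_trans _ _ _ h1l h2l⟩

theorem pvPairLt_antisymm {a b : Int × List String}
    (h1 : pvPairLt a b = false) (h2 : pvPairLt b a = false) : a = b := by
  simp only [pvPairLt, Bool.or_eq_false_iff, Bool.and_eq_false_iff, decide_eq_false_iff_not,
    not_lt] at h1 h2
  obtain ⟨h1a, h1b⟩ := h1
  obtain ⟨h2a, h2b⟩ := h2
  have he : a.1 = b.1 := le_antisymm h2a h1a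
  have hl : a.2 = b.2 := by
    rcases h1b with h | h
    · simp [he] at h
    · rcases h2b with h' | h'
      · simp [he] at h'
      · exact pvListLt_antisymm _ _ h h'
  exact Prod.ext he hl

-- Python's min() loop returns a member no element is smaller than
theorem pvFoldMin_spec :
    ∀ (rest : List (Int × List String)) (p : Int × List String),
      (rest.foldl (fun best x => if pvPairLt x best then x else best) p = p ∨
       rest.foldl (fun best x => if pvPairLt x best then x else best) p ∈ rest) ∧
      pvPairLt p (rest.foldl (fun best x => if pvPairLt x best then x else best) p) = false ∧
      ∀ x ∈ rest, pvPairLt x (rest.foldl (fun best x => if pvPairLt x best then x else best) p) = false := by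
  intro rest
  induction rest with
  | nil => intro p; exact ⟨Or.inl rfl, pvPairLt_irrefl p, by simp⟩
  | cons x t ih =>
    intro p
    rw [List.foldl_cons]
    by_cases hx : pvPairLt x p
    · rw [if_pos hx]
      obtain ⟨hmem, hple, hall⟩ := ih x
      have hpM : pvPairLt p (t.foldl (fun best x => if pvPairLt x best then x else best) x) = false := by
        rcases h : pvPairLt p (t.foldl (fun best x => if pvPairLt x best then x else best) x)
        · rfl
        · exact absurd (pvPairLt_trans hx h) (by rw [hple]; simp)
      refine ⟨?_, hpM, ?_⟩
      · rcases hmem with h | h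
        · right; rw [h]; exact List.mem_cons_self
        · right; exact List.mem_cons_of_mem x h
      · intro y hy
        rcases List.mem_cons.mp hy with h | h
        · rw [h]; exact hple
        · exact hall y h
    · rw [if_neg hx]
      obtain ⟨hmem, hple, hall⟩ := ih p
      have hxM : pvPairLt x (t.foldl (fun best x => if pvPairLt x best then x else best) p) = false := by
        rcases h : pvPairLt x (t.foldl (fun best x => if pvPairLt x best then x else best) p)
        · rfl
        · rcases hpx : pvPairLt p x
          · have heq := pvPairLt_antisymm (by simpa using hx) hpx
            rw [heq] at h
            exact absurd h (by rw [hple]; simp)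
          · exact absurd (pvPairLt_trans hpx h) (by rw [hple]; simp)
      refine ⟨?_, hple, ?_⟩
      · rcases hmem with h | h
        · left; exact h
        · right; exact List.mem_cons_of_mem x h
      · intro y hy
        rcases List.mem_cons.mp hy with h | h
        · rw [h]; exact hxM
        · exact hall y h

-- a row that splits to nothing scores 0
theorem pvRowScore_empty (r : String) (languages : List String) (preference : List Int)
    (h : PySem.Str.split₀ r = []) : pvRowScore r languages preference = 0 := by
  unfold pvRowScore
  rw [h]
  simp [PySem.List.index?_eq_idxOf?]

-- head of the sorted winners = min of the winners (list.sort();[0] versus min())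
theorem pvSortedHead_eq_min (w : List String) (hw : w ≠ []) :
    (PySem.List.sorted w (fun x => x) false).headD ""
      = ((PySem.List.min? w (fun x => x)).getD "") := by
  cases hs : PySem.List.sorted w (fun x => x) false with
  | nil => exact absurd ((PySem.List.sorted_eq_nil_iff w _ false).mp hs) hw
  | cons m t =>
    have hmem : m ∈ w := by
      have : m ∈ PySem.List.sorted w (fun x => x) false := by rw [hs]; exact List.mem_cons_self
      exact (PySem.List.mem_sorted w _ false m).mp this
    have hmle : ∀ y ∈ w, m ≤ y := PySem.List.key_head_sorted_le w (fun x => x) hs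
    cases hmn : PySem.List.min? w (fun x => x) with
    | none => exact absurd ((PySem.List.min?_eq_none_iff w _).mp hmn) hw
    | some mn =>
      have h1 : mn ≤ m := PySem.List.min?_isMin hmn m hmem
      have h2 : m ≤ mn := hmle mn (PySem.List.min?_mem hmn)
      simp [le_antisymm h2 h1]

-- a non-strict pair: the smaller list's head is the smaller string
theorem pvListLt_head_le {x y : String} {xs ys : List String}
    (h : pvListLt (x :: xs) (y :: ys) = false) : y ≤ x := by
  simp only [pvListLt] at h
  by_cases hxy : x < y
  · simp [hxy] at h
  · exact not_lt.mp hxy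

-- ===== VERDICT (by name: the statement is the Claim_ definition above) =====
theorem solution_spec : Claim_equal_solution := by
  intro table languages preference _ hpre
  obtain ⟨⟨r0, hr0mem, hr0⟩, hpre2⟩ := hpre
  unfold Spec_solution
  have hA : solution table languages preference
      = (PySem.List.sorted (pvALoop languages preference table 0 []).2 (fun x => x) false).headD "" := rfl
  -- abbreviations
  set score : String → Int := fun r => pvRowScore r languages preference with hscore
  set best : Int := table.foldl (fun a r => max a (score r)) 0 with hbest
  have hub : ∀ r ∈ table, score r ≤ best :=
    (PySem.List.le_foldl_max_int table score 0).2
  -- some row attains the running max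
  have hattain : ∃ r ∈ table, score r = best := by
    have hfold : best = (table.map score).foldl max 0 := by
      rw [hbest, List.foldl_map]
    rcases PySem.List.foldl_max_mem (table.map score) 0 with h0 | hmem
    · exact ⟨r0, hr0mem, le_antisymm (hub r0 hr0mem) (by rw [hfold, h0]; exact hr0)⟩
    · rw [← hfold] at hmem
      obtain ⟨r, hr, hrs⟩ := List.mem_map.mp hmem
      exact ⟨r, hr, hrs⟩
  -- rows that attain the max split to a nonempty word list
  have hwne : ∀ r ∈ table, score r = best → PySem.Str.split₀ r ≠ [] := by
    intro r hr hrbest hemp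
    have hb0 : best = 0 := by
      rw [← hrbest, hscore]; exact pvRowScore_empty r languages preference hemp
    obtain ⟨i, hilt, hgi⟩ := List.mem_iff_getElem.mp hr
    have hgetD : table.getD i "" = r := by rw [List.getD_eq_getElem table "" hilt, hgi]
    obtain ⟨k, hk, hkpos⟩ := hpre2 i (List.mem_range.mpr hilt) (by rw [hgetD, hemp])
    have hklt : k < table.length := lt_trans (List.mem_range.mp hk) hilt
    have hkmem : table.getD k "" ∈ table := by
      rw [List.getD_eq_getElem table "" hklt]; exact List.getElem_mem hklt
    have hle := hub _ hkmem
    simp only [hscore] at hle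
    omega
  -- B's pair list is the score formula, row by row
  have hpairs : (table.map PySem.Str.split₀).map
      (fun w => (-(pvBScore (pvPref languages preference) w), w))
      = table.map (fun r => (-(score r), PySem.Str.split₀ r)) := by
    rw [List.map_map]
    exact List.map_congr_left (fun r _ => by
      simp only [Function.comp, hscore]; rw [pvBScore_eq])
  -- the table (hence the pair list) is nonempty
  obtain ⟨p, rest, hpr⟩ :
      ∃ p rest, table.map (fun r => (-(score r), PySem.Str.split₀ r)) = p :: rest := by
    cases htab : table with
    | nil => rw [htab] at hr0mem; cases hr0mem
    | cons a t => exact ⟨_, _, rfl⟩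
  -- Python's min(): a member no element is smaller than
  obtain ⟨hmem0, hple, hall0⟩ := pvFoldMin_spec rest p
  set M := rest.foldl (fun best x => if pvPairLt x best then x else best) p with hM
  have hB : solution_alt table languages preference = M.2.headD "" := by
    show (match (table.map PySem.Str.split₀).map
            (fun w => (-(pvBScore (pvPref languages preference) w), w)) with
          | [] => ""
          | q :: qrest =>
            ((qrest.foldl (fun best x => if pvPairLt x best then x else best) q).2).headD "") = _
    rw [hpairs, hpr, hM]
  have hmem : M ∈ table.map (fun r => (-(score r), PySem.Str.split₀ r)) := by
    rw [hpr]
    rcases hmem0 with h | h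
    · exact h ▸ List.mem_cons_self
    · exact List.mem_cons_of_mem p h
  have hall : ∀ x ∈ table.map (fun r => (-(score r), PySem.Str.split₀ r)),
      pvPairLt x M = false := by
    intro x hx
    rw [hpr] at hx
    rcases List.mem_cons.mp hx with h | h
    · rw [h]; exact hple
    · exact hall0 x h
  obtain ⟨rM, hrM, hMeq⟩ := List.mem_map.mp hmem
  -- M's first component is -best
  obtain ⟨rstar, hrstar, hrstarbest⟩ := hattain
  have hMfst : score rM = best := by
    have hx := hall _ (List.mem_map_of_mem (f := fun r => (-(score r), PySem.Str.split₀ r)) hrstar)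
    rw [← hMeq] at hx
    simp only [pvPairLt, Bool.or_eq_false_iff, Bool.and_eq_false_iff,
      decide_eq_false_iff_not, not_lt] at hx
    have h1 := hx.1
    have h2 := hub rM hrM
    simp only at h1
    rw [hrstarbest] at h1
    omega
  have hMne : PySem.Str.split₀ rM ≠ [] := hwne rM hrM hMfst
  obtain ⟨m0, ms, hm0⟩ := List.exists_cons_of_ne_nil hMne
  have hMhead : M.2.headD "" = m0 := by rw [← hMeq]; simp [hm0]
  -- A's winner list
  set winners := (table.filter (fun r => score r == best)).map pvName with hwinners
  have hMw : m0 ∈ winners := by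
    rw [hwinners]
    refine List.mem_map.mpr ⟨rM, List.mem_filter.mpr ⟨hrM, by simp [hMfst]⟩, ?_⟩
    rw [pvName, hm0]; rfl
  have hminall : ∀ y ∈ winners, m0 ≤ y := by
    intro y hy
    rw [hwinners] at hy
    obtain ⟨r, hrf, hry⟩ := List.mem_map.mp hy
    obtain ⟨hr, hrb⟩ := List.mem_filter.mp hrf
    have hrbest : score r = best := by simpa using hrb
    have hrne : PySem.Str.split₀ r ≠ [] := hwne r hr hrbest
    obtain ⟨y0, ys, hy0⟩ := List.exists_cons_of_ne_nil hrne
    have hyname : y = y0 := by rw [← hry, pvName, hy0]; rfl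
    have hx := hall _ (List.mem_map_of_mem (f := fun r => (-(score r), PySem.Str.split₀ r)) hr)
    rw [← hMeq] at hx
    simp only [pvPairLt, Bool.or_eq_false_iff, Bool.and_eq_false_iff,
      decide_eq_false_iff_not, not_lt, beq_eq_false_iff_ne, ne_eq] at hx
    have heqfst : -(score r) = -(score rM) := by rw [hrbest, hMfst]
    rcases hx.2 with h | h
    · exact absurd heqfst h
    · have hll : pvListLt (PySem.Str.split₀ r) (PySem.Str.split₀ rM) = false := h
      rw [hy0, hm0] at hll
      rw [hyname]
      exact pvListLt_head_le hll
  -- both sides compute the least winner name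
  have hwnonnil : winners ≠ [] := List.ne_nil_of_mem hMw
  rw [hA, hB, hMhead, pvALoop_spec]
  simp only [ite_self, List.nil_append]
  rw [pvSortedHead_eq_min _ hwnonnil]
  cases hmn : PySem.List.min? winners (fun x => x) with
  | none => exact absurd ((PySem.List.min?_eq_none_iff winners _).mp hmn) hwnonnil
  | some mn =>
    have h1 : mn ≤ m0 := PySem.List.min?_isMin hmn m0 hMw
    have h2 : m0 ≤ mn := hminall mn (PySem.List.min?_mem hmn)
    simp [le_antisymm h1 h2]
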